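-- pv_equiv track=rewrite | github.com/igorol/advent_of_code | 2016/02/main.py | part2
-- ===== SOURCE A (Python) =====
-- def part2(lines):
--     keypad = [['0', '0', '1', '0', '0'],
--               ['0', '2', '3', '4', '5'],
--               ['5', '6', '7', '8', '9'],
--               ['0', 'A', 'B', 'C', '0'],
--               ['0', '0', 'D', '0', '0']]
--
--     x, y = 2, 2
--     password = []
--     for line in lines:
--         for i in line:
--             left = {y == 2: 0, y in [1, 3]: 1}.get(True, 2)
--             right = {y == 2: 4, y in [1, 3]: 3}.get(True, 2)
--             top = {x == 2: 4, x in [1, 3]: 3}.get(True, 2)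
--             bottom = {x == 2: 0, x in [1, 3]: 1}.get(True, 2)
--             x = {i == 'R': min(x + 1, right), i == 'L': max(x - 1, left)}.get(True, x)
--             y = {i == 'D': min(y + 1, top), i == 'U': max(y - 1, bottom)}.get(True, y)
--         password.append(keypad[y][x])
--
--     return ''.join(password)
-- ===== SOURCE B (Python) =====
-- def part2(lines):
--     keys = {(2, 0): '1',
--             (1, 1): '2', (2, 1): '3', (3, 1): '4',
--             (0, 2): '5', (1, 2): '6', (2, 2): '7', (3, 2): '8', (4, 2): '9',
--             (1, 3): 'A', (2, 3): 'B', (3, 3): 'C',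
--             (2, 4): 'D'}
--     moves = {'U': (0, -1), 'D': (0, 1), 'L': (-1, 0), 'R': (1, 0)}
--     x, y = 2, 2
--     out = []
--     for line in lines:
--         for c in line:
--             dx, dy = moves.get(c, (0, 0))
--             if (x + dx, y + dy) in keys:
--                 x, y = x + dx, y + dy
--         out.append(keys[(x, y)])
--     return ''.join(out)
-- ===== Notes on version B (the rewrite author's own statement) =====
-- stated objective: faster
-- what changed: B replaces A's per-step left/right/top/bottom clamp bounds (each rebuilt every character via bool-keyed dict tricks from the other coordinate) with one precomputed (x,y)->key dict and a single try-the-move-then-membership-test step, reading the appended key by direct dict lookup.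
import Mathlib
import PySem

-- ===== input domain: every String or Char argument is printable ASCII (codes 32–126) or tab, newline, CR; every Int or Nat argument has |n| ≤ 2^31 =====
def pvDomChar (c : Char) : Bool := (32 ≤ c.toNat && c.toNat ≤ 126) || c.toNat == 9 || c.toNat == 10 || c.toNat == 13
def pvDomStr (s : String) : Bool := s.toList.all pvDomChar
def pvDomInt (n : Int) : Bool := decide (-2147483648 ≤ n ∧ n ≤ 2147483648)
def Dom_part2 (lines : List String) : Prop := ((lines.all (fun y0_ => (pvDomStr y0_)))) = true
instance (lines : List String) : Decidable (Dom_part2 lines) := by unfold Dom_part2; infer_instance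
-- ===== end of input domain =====

-- B replaces A's per-step clamp-bound computation with a coordinate→key dict and a
-- single membership test per move (idiomatic; same asymptotic cost).

-- ===== PORT A =====
def part2Keypad : List (List String) :=
  [["0", "0", "1", "0", "0"],
   ["0", "2", "3", "4", "5"],
   ["5", "6", "7", "8", "9"],
   ["0", "A", "B", "C", "0"],
   ["0", "0", "D", "0", "0"]]

-- one iteration of A's inner loop; Python's `{cond1: v1, cond2: v2}.get(True, d)`
-- is transliterated as a Bool-keyed PySem.Dict built by the same two inserts.
def part2Step (st : Int × Int) (i : Char) : Int × Int :=
  let x := st.1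
  let y := st.2
  let left := ((PySem.Dict.empty.insert (decide (y = 2)) (0 : Int)).insert (decide (y = 1 ∨ y = 3)) 1).getD true 2
  let right := ((PySem.Dict.empty.insert (decide (y = 2)) (4 : Int)).insert (decide (y = 1 ∨ y = 3)) 3).getD true 2
  let top := ((PySem.Dict.empty.insert (decide (x = 2)) (4 : Int)).insert (decide (x = 1 ∨ x = 3)) 3).getD true 2
  let bottom := ((PySem.Dict.empty.insert (decide (x = 2)) (0 : Int)).insert (decide (x = 1 ∨ x = 3)) 1).getD true 2
  let x' := ((PySem.Dict.empty.insert (decide (i = 'R')) (min (x + 1) right)).insert (decide (i = 'L')) (max (x - 1) left)).getD true x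
  let y' := ((PySem.Dict.empty.insert (decide (i = 'D')) (min (y + 1) top)).insert (decide (i = 'U')) (max (y - 1) bottom)).getD true y
  (x', y')

def part2 (lines : List String) : String :=
  let st := lines.foldl
    (fun (acc : (Int × Int) × List String) line =>
      let p := line.toList.foldl part2Step acc.1
      -- keypad[y][x]: the position always stays on the keypad, so the pyGet? never
      -- returns none; ".getD" defaults are never hit.
      (p, acc.2 ++ [(PySem.List.pyGet? ((PySem.List.pyGet? part2Keypad p.2).getD []) p.1).getD "0"]))
    ((2, 2), [])
  PySem.Str.join "" st.2

-- ===== PORT B =====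
def part2Keys : PySem.Dict (Int × Int) String :=
  PySem.Dict.ofList
    [((2, 0), "1"),
     ((1, 1), "2"), ((2, 1), "3"), ((3, 1), "4"),
     ((0, 2), "5"), ((1, 2), "6"), ((2, 2), "7"), ((3, 2), "8"), ((4, 2), "9"),
     ((1, 3), "A"), ((2, 3), "B"), ((3, 3), "C"),
     ((2, 4), "D")]

def part2Moves : PySem.Dict Char (Int × Int) :=
  PySem.Dict.ofList [('U', (0, -1)), ('D', (0, 1)), ('L', (-1, 0)), ('R', (1, 0))]

def part2StepB (st : Int × Int) (c : Char) : Int × Int :=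
  let d := part2Moves.getD c (0, 0)
  let nx := st.1 + d.1
  let ny := st.2 + d.2
  if (part2Keys.get? (nx, ny)).isSome then (nx, ny) else st

def part2_alt (lines : List String) : String :=
  let st := lines.foldl
    (fun (acc : (Int × Int) × List String) line =>
      let p := line.toList.foldl part2StepB acc.1
      -- keys[(x,y)]: the position is always a valid key, so get? is some; ".getD" never hit.
      (p, acc.2 ++ [(part2Keys.get? p).getD "?"]))
    ((2, 2), [])
  PySem.Str.join "" st.2

-- ===== PRECONDITION & SPEC =====
def Spec_part2 (lines : List String) (out : String) : Prop := out = part2_alt lines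
instance (lines : List String) (out : String) : Decidable (Spec_part2 lines out) := by unfold Spec_part2; infer_instance

-- ===== CLAIM (what is proved, stated in full; the proofs are below) =====
def Claim_equal_part2 : Prop := ∀ (lines : List String), Dom_part2 lines → Spec_part2 lines (part2 lines)

-- ===== LEMMAS AND PROOFS =====

-- the 13 valid keypad positions (the diamond)
def part2Valid : List (Int × Int) :=
  [(2, 0),
   (1, 1), (2, 1), (3, 1),
   (0, 2), (1, 2), (2, 2), (3, 2), (4, 2),
   (1, 3), (2, 3), (3, 3),
   (2, 4)]

lemma step_agree (p : Int × Int) (hp : p ∈ part2Valid) (c : Char) :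
    part2Step p c = part2StepB p c ∧ part2StepB p c ∈ part2Valid := by
  by_cases hR : c = 'R'
  · subst hR; fin_cases hp <;> exact ⟨by decide, by decide⟩
  by_cases hL : c = 'L'
  · subst hL; fin_cases hp <;> exact ⟨by decide, by decide⟩
  by_cases hD : c = 'D'
  · subst hD; fin_cases hp <;> exact ⟨by decide, by decide⟩
  by_cases hU : c = 'U'
  · subst hU; fin_cases hp <;> exact ⟨by decide, by decide⟩
  · have hR' : ('R' == c) = false := beq_eq_false_iff_ne.mpr (Ne.symm hR)
    have hL' : ('L' == c) = false := beq_eq_false_iff_ne.mpr (Ne.symm hL)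
    have hD' : ('D' == c) = false := beq_eq_false_iff_ne.mpr (Ne.symm hD)
    have hU' : ('U' == c) = false := beq_eq_false_iff_ne.mpr (Ne.symm hU)
    have hfind : List.find? (fun q => q.1 == c) part2Moves.items = none := by
      simp [part2Moves, PySem.Dict.ofList, PySem.Dict.empty, PySem.Dict.update,
        PySem.Dict.insert, List.find?, hR', hL', hD', hU']
    constructor
    · simp [part2Step, part2StepB, hfind, PySem.Dict.getD, PySem.Dict.get?,
        PySem.Dict.insert, PySem.Dict.empty, List.find?, hR, hL, hD, hU]
    · simpa [part2StepB, hfind, PySem.Dict.getD, PySem.Dict.get?] using hp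

lemma inner_agree (cs : List Char) (p : Int × Int) (hp : p ∈ part2Valid) :
    cs.foldl part2Step p = cs.foldl part2StepB p ∧ cs.foldl part2StepB p ∈ part2Valid := by
  induction cs generalizing p with
  | nil => exact ⟨rfl, hp⟩
  | cons c cs ih =>
    obtain ⟨h1, h2⟩ := step_agree p hp c
    simpa [List.foldl_cons, h1] using ih (part2StepB p c) h2

lemma key_agree (p : Int × Int) (hp : p ∈ part2Valid) :
    (PySem.List.pyGet? ((PySem.List.pyGet? part2Keypad p.2).getD []) p.1).getD "0"
      = (part2Keys.get? p).getD "?" := by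
  fin_cases hp <;> decide

lemma outer_agree (lines : List String) (p : Int × Int) (acc : List String)
    (hp : p ∈ part2Valid) :
    lines.foldl
      (fun (acc : (Int × Int) × List String) line =>
        let q := line.toList.foldl part2Step acc.1
        (q, acc.2 ++ [(PySem.List.pyGet? ((PySem.List.pyGet? part2Keypad q.2).getD []) q.1).getD "0"]))
      (p, acc)
    = lines.foldl
      (fun (acc : (Int × Int) × List String) line =>
        let q := line.toList.foldl part2StepB acc.1
        (q, acc.2 ++ [(part2Keys.get? q).getD "?"]))
      (p, acc) := by
  induction lines generalizing p acc with
  | nil => rfl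
  | cons line rest ih =>
    obtain ⟨h1, h2⟩ := inner_agree line.toList p hp
    simp only [List.foldl_cons, h1, key_agree _ h2]
    exact ih _ _ h2

-- ===== VERDICT (by name: the statement is the Claim_ definition above) =====
theorem part2_spec : Claim_equal_part2 := by
  intro lines _
  show part2 lines = part2_alt lines
  unfold part2 part2_alt
  rw [outer_agree lines (2, 2) [] (by decide)]
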